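-- pv_equiv track=rewrite | github.com/TurtleGod7/Strawberry-Puff-Bot | src/main.py | split_on_newlines
-- ===== SOURCE A (Python) =====
-- def split_on_newlines(text, max_length=1000):
--     result = []
--     start = 0
--     while start < len(text):
--         end = start + max_length
--         # If the string is shorter than max_length
--         if end >= len(text):
--             result.append(text[start:])
--             break
--
--         # Try to find the last newline before the max length
--         newline_pos = text.rfind('\n', start, end)
--         if newline_pos != -1:
--             result.append(text[start:newline_pos + 1])  # Include the newline
--             start = newline_pos + 1
--         else:
--             result.append(text[start:end])
--             start = end
--
--     return result
-- ===== SOURCE B (Python) =====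
-- def split_on_newlines(text, max_length=1000):
--     # One pass to index every newline position, then a greedy walk that
--     # consumes those positions with a moving pointer instead of re-scanning
--     # each window with rfind.
--     nls = [i for i, c in enumerate(text) if c == '\n']
--     n = len(text)
--     result = []
--     start = 0
--     j = 0
--     while start < n:
--         end = start + max_length
--         if end >= n:
--             result.append(text[start:])
--             break
--         while j < len(nls) and nls[j] < end:
--             j += 1
--         if j > 0 and nls[j - 1] >= start:
--             p = nls[j - 1]
--             result.append(text[start:p + 1])
--             start = p + 1
--         else:
--             result.append(text[start:end])
--             start = end
--     return result
-- ===== Notes on version B (the rewrite author's own statement) =====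
-- stated objective: alternative
-- what changed: B first builds the list of all newline positions in one pass, then the greedy chunk loop picks each break by advancing a pointer through that index list instead of re-scanning every window with rfind.
import Mathlib
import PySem

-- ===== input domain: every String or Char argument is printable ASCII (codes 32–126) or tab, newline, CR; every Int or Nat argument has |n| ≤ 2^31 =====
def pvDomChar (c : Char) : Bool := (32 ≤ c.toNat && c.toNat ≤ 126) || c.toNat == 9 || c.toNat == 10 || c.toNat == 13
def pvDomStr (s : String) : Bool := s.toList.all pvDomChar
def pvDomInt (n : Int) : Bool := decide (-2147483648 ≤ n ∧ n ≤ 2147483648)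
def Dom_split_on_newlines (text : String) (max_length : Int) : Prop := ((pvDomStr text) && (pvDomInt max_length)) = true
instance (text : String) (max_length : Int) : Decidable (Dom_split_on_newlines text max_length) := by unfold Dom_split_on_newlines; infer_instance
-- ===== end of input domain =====

-- B replaces A's per-window rfind scan by a precomputed list of newline
-- positions consumed with a moving pointer (alternative decomposition).

-- ===== PORT A =====
-- The Python while-loop; fuel = len(text)+1 only makes the recursion total
-- (under Pre_ the loop runs at most len(text) iterations, so fuel never runs out).
def splitA_loop (text : String) (max_length : Int) : Nat → Int → List String → List String
  | fuel, start, result =>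
    if start < PySem.Str.len text then
      match fuel with
      | 0 => result
      | f + 1 =>
        let e := start + max_length
        if PySem.Str.len text ≤ e then
          result ++ [PySem.Str.slice text (some start) none]
        else
          let np := PySem.Str.rfindFrom text "\n" start (some e)
          if np ≠ -1 then
            splitA_loop text max_length f (np + 1)
              (result ++ [PySem.Str.slice text (some start) (some (np + 1))])
          else
            splitA_loop text max_length f e
              (result ++ [PySem.Str.slice text (some start) (some e)])
    else result

def split_on_newlines (text : String) (max_length : Int) : List String :=
  splitA_loop text max_length (text.toList.length + 1) 0 []

-- ===== PORT B =====
-- [i for i, c in enumerate(text) if c == '\n']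
def nlIndices (text : String) : List Int :=
  ((PySem.List.enumerate text.toList).filter (fun p => p.2 == '\n')).map Prod.fst

-- inner `while j < len(nls) and nls[j] < end: j += 1`
def advanceJ (nls : List Int) (e : Int) (j : Nat) : Nat :=
  if h : j < nls.length then
    if nls[j] < e then advanceJ nls e (j + 1) else j
  else j
termination_by nls.length - j

-- outer while-loop of B (same fuel device as A's port)
def splitB_loop (text : String) (nls : List Int) (max_length : Int) :
    Nat → Int → Nat → List String → List String
  | fuel, start, j, result =>
    if start < PySem.Str.len text then
      match fuel with
      | 0 => result
      | f + 1 =>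
        let e := start + max_length
        if PySem.Str.len text ≤ e then
          result ++ [PySem.Str.slice text (some start) none]
        else
          let j' := advanceJ nls e j
          -- nls[j'-1]; the index is in range whenever 0 < j' (getD default never read)
          let p := nls.getD (j' - 1) 0
          if 0 < j' ∧ p ≥ start then
            splitB_loop text nls max_length f (p + 1) j'
              (result ++ [PySem.Str.slice text (some start) (some (p + 1))])
          else
            splitB_loop text nls max_length f e j'
              (result ++ [PySem.Str.slice text (some start) (some e)])
    else result

def split_on_newlines_alt (text : String) (max_length : Int) : List String :=
  splitB_loop text (nlIndices text) max_length (text.toList.length + 1) 0 0 []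

-- ===== PRECONDITION & SPEC =====
-- Pre_ excludes exactly the inputs on which the Python A never returns:
-- on non-empty text with max_length ≤ 0 its while-loop cycles forever.
def Pre_split_on_newlines (text : String) (max_length : Int) : Prop :=
  text = "" ∨ 1 ≤ max_length

instance (text : String) (max_length : Int) : Decidable (Pre_split_on_newlines text max_length) := by
  unfold Pre_split_on_newlines; infer_instance

def pvWitness_split_on_newlines : String × Int := ("ab\ncd\nef", 4)

def Spec_split_on_newlines (text : String) (max_length : Int) (out : List String) : Prop :=
  out = split_on_newlines_alt text max_length

instance (text : String) (max_length : Int) (out : List String) :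
    Decidable (Spec_split_on_newlines text max_length out) := by
  unfold Spec_split_on_newlines; infer_instance

-- ===== CLAIM (what is proved, stated in full; the proofs are below) =====
def Claim_equal_split_on_newlines : Prop :=
  ∀ (text : String) (max_length : Int), Dom_split_on_newlines text max_length →
    Pre_split_on_newlines text max_length →
      Spec_split_on_newlines text max_length (split_on_newlines text max_length)

-- ===== LEMMAS AND PROOFS =====

-- [c] is a prefix of l iff l starts with c
theorem pv_singleton_prefix (c : Char) (l : List Char) : ([c] <+: l) ↔ l[0]? = some c := by
  cases l <;> simp [eq_comm]

-- rfind.go returns the largest i ≤ k at which sub is a prefix of w.drop i, else -1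
theorem pv_go_spec (w sub : List Char) (k : Nat) :
    (PySem.Chars.rfind.go w sub k = -1 ∧ ∀ i : Nat, i ≤ k → ¬ sub <+: w.drop i) ∨
    (∃ i : Nat, PySem.Chars.rfind.go w sub k = (i : Int) ∧ i ≤ k ∧ sub <+: w.drop i ∧
      ∀ i' : Nat, i < i' → i' ≤ k → ¬ sub <+: w.drop i') := by
  induction k with
  | zero =>
    by_cases h : sub <+: w
    · right
      exact ⟨0, by simp [PySem.Chars.rfind.go, List.isPrefixOf_iff_prefix, h], le_refl 0, by simpa using h,
        fun i' hi hi' => absurd (Nat.lt_of_lt_of_le hi hi') (lt_irrefl 0)⟩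
    · left
      refine ⟨by simp [PySem.Chars.rfind.go, List.isPrefixOf_iff_prefix, h], ?_⟩
      intro i hi
      interval_cases i
      simpa using h
  | succ j ih =>
    by_cases h : sub <+: w.drop (j + 1)
    · right
      refine ⟨j + 1, ?_, le_refl _, h, fun i' hi hi' => absurd (Nat.lt_of_lt_of_le hi hi') (lt_irrefl _)⟩
      simp [PySem.Chars.rfind.go, List.isPrefixOf_iff_prefix, h]
    · have hgo : PySem.Chars.rfind.go w sub (j + 1) = PySem.Chars.rfind.go w sub j := by
        simp [PySem.Chars.rfind.go, List.isPrefixOf_iff_prefix, h]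
      rcases ih with ⟨h1, h2⟩ | ⟨i, h1, h2, h3, h4⟩
      · left
        refine ⟨hgo ▸ h1, fun i hi => ?_⟩
        rcases Nat.lt_or_ge i (j + 1) with hi' | hi'
        · exact h2 i (Nat.lt_succ_iff.mp hi')
        · have : i = j + 1 := le_antisymm hi hi'
          exact this ▸ h
      · right
        refine ⟨i, hgo ▸ h1, Nat.le_succ_of_le h2, h3, fun i' hlt hle => ?_⟩
        rcases Nat.lt_or_ge i' (j + 1) with hi' | hi'
        · exact h4 i' hlt (Nat.lt_succ_iff.mp hi')
        · have : i' = j + 1 := le_antisymm hle hi'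
          exact this ▸ h

-- window indexing
theorem pv_window_get (s : List Char) (st et i : Nat) :
    ((s.take et).drop st)[i]? = if st + i < et then s[st + i]? else none := by
  rw [List.getElem?_drop]
  by_cases h : st + i < et
  · rw [if_pos h, List.getElem?_take_of_lt h]
  · rw [if_neg h]
    have hle : (s.take et).length ≤ st + i := by simp; omega
    simp [List.getElem?_eq_none hle]

-- characterization of text.rfind('\n', st, et) for 0 ≤ st ≤ et ≤ len
theorem pv_rfindFrom_spec (s : List Char) (st et : Nat) (h1 : st ≤ et) (h2 : et ≤ s.length) :
    (PySem.Chars.rfindFrom s ['\n'] (st : Int) (some (et : Int)) = -1 ∧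
       ∀ q : Nat, st ≤ q → q < et → s[q]? ≠ some '\n') ∨
    (∃ p : Nat, PySem.Chars.rfindFrom s ['\n'] (st : Int) (some (et : Int)) = (p : Int) ∧
       st ≤ p ∧ p < et ∧ s[p]? = some '\n' ∧
       ∀ q : Nat, p < q → q < et → s[q]? ≠ some '\n') := by
  have hne : ¬ ((s.length : Int) < (et : Int)) := by exact_mod_cast not_lt.mpr h2
  have h0e : ¬ ((et : Int) < 0) := by simp
  have h0s : ¬ ((st : Int) < 0) := by simp
  have hes : ¬ ((et : Int) < (st : Int)) := by exact_mod_cast not_lt.mpr h1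
  have hred : PySem.Chars.rfindFrom s ['\n'] (st : Int) (some (et : Int)) =
      (if PySem.Chars.rfind ((s.take et).drop st) ['\n'] = -1 then -1
       else (st : Int) + PySem.Chars.rfind ((s.take et).drop st) ['\n']) := by
    simp only [PySem.Chars.rfindFrom]
    simp [hne, h0e, h0s, hes]
  set w := (s.take et).drop st with hw
  have hwl : w.length = et - st := by
    simp [hw]
    omega
  have hpre : ∀ i : Nat, (['\n'] <+: w.drop i) ↔ (st + i < et ∧ s[st + i]? = some '\n') := by
    intro i
    rw [pv_singleton_prefix, List.getElem?_drop, hw, pv_window_get]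
    split <;> simp_all
  have hgo := pv_go_spec w ['\n'] w.length
  have hrfind : PySem.Chars.rfind w ['\n'] = PySem.Chars.rfind.go w ['\n'] w.length := rfl
  rcases hgo with ⟨hg1, hg2⟩ | ⟨i, hg1, hg2, hg3, hg4⟩
  · left
    constructor
    · rw [hred, hrfind, hg1]; simp
    · intro q hq1 hq2 hq
      have := hg2 (q - st) (by omega)
      rw [hpre] at this
      exact this ⟨by omega, by rwa [show st + (q - st) = q by omega]⟩
  · right
    rw [hpre] at hg3
    refine ⟨st + i, ?_, by omega, hg3.1, hg3.2, ?_⟩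
    · rw [hred, hrfind, hg1]
      have : ¬ ((i : Int) = -1) := by omega
      simp [this]
    · intro q hq1 hq2 hq
      have := hg4 (q - st) (by omega) (by omega)
      rw [hpre] at this
      exact this ⟨by omega, by rwa [show st + (q - st) = q by omega]⟩

-- characterization of the filtered enumerate list
theorem pv_nls_aux (s : List Char) (k : Int) :
    (∀ x ∈ ((PySem.List.enumerate s k).filter (fun p => p.2 == '\n')).map Prod.fst,
        ∃ q : Nat, x = k + q ∧ q < s.length ∧ s[q]? = some '\n') ∧
    (∀ q : Nat, q < s.length → s[q]? = some '\n' →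
        (k + q) ∈ ((PySem.List.enumerate s k).filter (fun p => p.2 == '\n')).map Prod.fst) ∧
    List.Pairwise (· < ·) (((PySem.List.enumerate s k).filter (fun p => p.2 == '\n')).map Prod.fst) := by
  induction s generalizing k with
  | nil => simp [PySem.List.enumerate]
  | cons c t ih =>
    have henum : PySem.List.enumerate (c :: t) k = (k, c) :: PySem.List.enumerate t (k + 1) := by
      simp [PySem.List.enumerate]
    rcases ih (k + 1) with ⟨ih1, ih2, ih3⟩
    by_cases hc : c = '\n'
    · rw [henum]
      simp only [List.filter_cons, hc]
      simp only [beq_self_eq_true, if_true, List.map_cons]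
      refine ⟨?_, ?_, ?_⟩
      · intro x hx
        rcases List.mem_cons.mp hx with h | h
        · exact ⟨0, by simp [h], by simp, by simp⟩
        · rcases ih1 x h with ⟨q, hq1, hq2, hq3⟩
          exact ⟨q + 1, by omega, by simp; omega, by simpa using hq3⟩
      · intro q hq hq'
        cases q with
        | zero => simp
        | succ q' =>
          right
          have := ih2 q' (by simp at hq; omega) (by simpa using hq')
          have he : k + ((q' + 1 : Nat) : Int) = k + 1 + (q' : Int) := by push_cast; ring
          rw [he]
          exact this
      · refine List.pairwise_cons.mpr ⟨?_, ih3⟩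
        intro x hx
        rcases ih1 x hx with ⟨q, hq1, _, _⟩
        omega
    · rw [henum]
      simp only [List.filter_cons]
      have : ¬ (c == '\n') = true := by simpa using hc
      simp only [this]
      refine ⟨?_, ?_, ih3⟩
      · intro x hx
        rcases ih1 x hx with ⟨q, hq1, hq2, hq3⟩
        exact ⟨q + 1, by omega, by simp; omega, by simpa using hq3⟩
      · intro q hq hq'
        cases q with
        | zero => simp_all
        | succ q' =>
          have := ih2 q' (by simp at hq; omega) (by simpa using hq')
          have he : k + ((q' + 1 : Nat) : Int) = k + 1 + (q' : Int) := by push_cast; ring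
          rw [he]
          exact this

theorem pv_nls_mem (text : String) :
    (∀ x ∈ nlIndices text, ∃ q : Nat, x = (q : Int) ∧ q < text.toList.length ∧ text.toList[q]? = some '\n') ∧
    (∀ q : Nat, q < text.toList.length → text.toList[q]? = some '\n' → (q : Int) ∈ nlIndices text) ∧
    List.Pairwise (· < ·) (nlIndices text) := by
  rcases pv_nls_aux text.toList 0 with ⟨h1, h2, h3⟩
  refine ⟨?_, ?_, h3⟩
  · intro x hx
    rcases h1 x hx with ⟨q, hq1, hq2, hq3⟩
    exact ⟨q, by omega, hq2, hq3⟩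
  · intro q hq hq'
    have := h2 q hq hq'
    have hz : (0 : Int) + (q : Int) = (q : Int) := by ring
    rwa [hz] at this

-- sorted access is monotone
theorem pv_sorted_le (nls : List Int) (hs : List.Pairwise (· < ·) nls)
    (i j : Nat) (hi : i < nls.length) (hj : j < nls.length) (hij : i ≤ j) :
    nls[i] ≤ nls[j] := by
  rcases Nat.lt_or_ge i j with h | h
  · exact le_of_lt (List.pairwise_iff_get.mp hs ⟨i, hi⟩ ⟨j, hj⟩ h)
  · have : i = j := by omega
    subst this; exact le_refl _

-- the inner while-loop advances j to the count of elements < e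
theorem pv_advanceJ_spec (nls : List Int) (e : Int) (j : Nat)
    (hs : List.Pairwise (· < ·) nls) (hj : j ≤ nls.length)
    (hlow : ∀ k : Nat, (hk : k < nls.length) → k < j → nls[k] < e) :
    j ≤ advanceJ nls e j ∧ advanceJ nls e j ≤ nls.length ∧
      ∀ k : Nat, (hk : k < nls.length) → (k < advanceJ nls e j ↔ nls[k] < e) := by
  induction j using advanceJ.induct (nls := nls) (e := e) with
  | case1 j h hje ih =>
    rw [advanceJ, dif_pos h, if_pos hje]
    have hlow' : ∀ k : Nat, (hk : k < nls.length) → k < j + 1 → nls[k] < e := by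
      intro k hk hkj
      rcases Nat.lt_or_ge k j with h' | h'
      · exact hlow k hk h'
      · have : k = j := by omega
        subst this; exact hje
    rcases ih (by omega) hlow' with ⟨i1, i2, i3⟩
    exact ⟨by omega, i2, i3⟩
  | case2 j h hje =>
    rw [advanceJ, dif_pos h, if_neg hje]
    refine ⟨le_refl _, by omega, fun k hk => ⟨hlow k hk, fun hke => ?_⟩⟩
    by_contra hkj
    have : nls[j] ≤ nls[k] := pv_sorted_le nls hs j k h hk (by omega)
    omega
  | case3 j h =>
    rw [advanceJ, dif_neg h]
    have : j = nls.length := by omega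
    subst this
    exact ⟨le_refl _, le_refl _, fun k hk => ⟨fun _ => hlow k hk hk, fun _ => hk⟩⟩

-- the two loops agree given the pointer invariant
theorem pv_loop_eq (text : String) (m : Int) (hm : 1 ≤ m) :
    ∀ (fuel : Nat) (st : Nat) (j : Nat) (acc : List String),
      j ≤ (nlIndices text).length →
      (∀ k : Nat, (hk : k < (nlIndices text).length) → (k < j ↔ (nlIndices text)[k] < (st : Int))) →
      splitA_loop text m fuel (st : Int) acc = splitB_loop text (nlIndices text) m fuel (st : Int) j acc := by
  intro fuel
  induction fuel with
  | zero =>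
    intro st j acc _ _
    rw [splitA_loop, splitB_loop]
  | succ f ih =>
    intro st j acc hj hinv
    rcases pv_nls_mem text with ⟨hN1, hN2, hN3⟩
    set nls := nlIndices text with hnls
    by_cases hlt : (st : Int) < PySem.Str.len text
    · by_cases hend : PySem.Str.len text ≤ (st : Int) + m
      · rw [splitA_loop, splitB_loop]
        simp only [hlt, if_true, hend]
      · -- main case: st + m < len
        have hlen : PySem.Str.len text = (text.toList.length : Int) := rfl
        set n := text.toList.length with hn
        obtain ⟨et, het⟩ : ∃ et : Nat, (st : Int) + m = (et : Int) :=
          ⟨((st : Int) + m).toNat, by rw [hlen] at hend; omega⟩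
        have hstet : st < et := by omega
        have hetn : et < n := by rw [hlen] at hend; omega
        -- advanceJ spec at e = st + m = et
        have hlow : ∀ k : Nat, (hk : k < nls.length) → k < j → nls[k] < (st : Int) + m := by
          intro k hk hkj
          have := (hinv k hk).mp hkj
          omega
        rcases pv_advanceJ_spec nls ((st : Int) + m) j hN3 hj hlow with ⟨hA1, hA2, hA3⟩
        set j' := advanceJ nls ((st : Int) + m) j with hj'
        -- rfind spec
        have hrw : PySem.Str.rfindFrom text "\n" (st : Int) (some ((st : Int) + m)) =
            PySem.Chars.rfindFrom text.toList ['\n'] (st : Int) (some (et : Int)) := by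
          rw [PySem.Str.rfindFrom_eq, het]
          rfl
        rcases pv_rfindFrom_spec text.toList st et (by omega) (by omega) with
          ⟨hR1, hR2⟩ | ⟨p, hR1, hR2, hR3, hR4, hR5⟩
        · -- no newline in the window: both take the else branch
          have hBfalse : ¬ (0 < j' ∧ nls.getD (j' - 1) 0 ≥ (st : Int)) := by
            rintro ⟨hj0, hge⟩
            have hjl : j' - 1 < nls.length := by omega
            have hx : nls.getD (j' - 1) 0 = nls[j' - 1] := List.getD_eq_getElem nls 0 hjl
            rcases hN1 nls[j' - 1] (List.getElem_mem hjl) with ⟨q, hq1, hq2, hq3⟩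
            have hqe : nls[j' - 1] < (st : Int) + m := (hA3 (j' - 1) hjl).mp (by omega)
            exact hR2 q (by omega) (by omega) hq3
          rw [splitA_loop, splitB_loop]
          simp only [hlt, if_true, hend, if_false, hrw, hR1]
          rw [if_neg (by simp), if_neg hBfalse]
          have := ih et j' (acc ++ [PySem.Str.slice text (some (st : Int)) (some ((st : Int) + m))])
            (by omega) (fun k hk => by rw [← het]; exact hA3 k hk)
          rw [hj'] at this
          rw [het] at this ⊢
          exact this
        · -- newline found at p: both take the then branch, with the same p
          have hpmem : (p : Int) ∈ nls := hN2 p (by omega) hR4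
          rcases List.mem_iff_getElem.mp hpmem with ⟨k0, hk0, hk0v⟩
          have hk0j : k0 < j' := (hA3 k0 hk0).mpr (by omega)
          have hj0 : 0 < j' := by omega
          have hjl : j' - 1 < nls.length := by omega
          have hx : nls.getD (j' - 1) 0 = nls[j' - 1] := List.getD_eq_getElem nls 0 hjl
          rcases hN1 nls[j' - 1] (List.getElem_mem hjl) with ⟨q, hq1, hq2, hq3⟩
          have hqe : nls[j' - 1] < (st : Int) + m := (hA3 (j' - 1) hjl).mp (by omega)
          have hpq : (p : Int) ≤ nls[j' - 1] := by
            rw [← hk0v]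
            exact pv_sorted_le nls hN3 k0 (j' - 1) hk0 hjl (by omega)
          -- q = p by maximality
          have hqp : q = p := by
            by_contra hne
            exact hR5 q (by omega) (by omega) hq3
          have hxp : nls.getD (j' - 1) 0 = (p : Int) := by rw [hx, hq1, hqp]
          have hBtrue : (0 < j' ∧ nls.getD (j' - 1) 0 ≥ (st : Int)) := ⟨hj0, by rw [hxp]; omega⟩
          have hAfound : ¬ (PySem.Str.rfindFrom text "\n" (st : Int) (some ((st : Int) + m)) = -1) := by
            rw [hrw, hR1]; omega
          rw [splitA_loop, splitB_loop]
          simp only [hlt, if_true]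
          rw [if_neg hend, if_neg hend]
          rw [if_pos hBtrue, hxp]
          simp only [ne_eq, hAfound, not_false_eq_true, if_true]
          rw [hrw, hR1]
          have hcast : (p : Int) + 1 = ((p + 1 : Nat) : Int) := by push_cast; ring
          rw [hcast]
          exact ih (p + 1) j' (acc ++ [PySem.Str.slice text (some (st : Int)) (some ((p + 1 : Nat) : Int))])
            (by omega)
            (fun k hk => by
              constructor
              · intro hkj'
                rcases hN1 nls[k] (List.getElem_mem hk) with ⟨qk, hqk1, hqk2, hqk3⟩
                have : nls[k] < (st : Int) + m := (hA3 k hk).mp hkj'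
                have hqkp : qk ≤ p := by
                  by_contra hgt
                  exact hR5 qk (by omega) (by omega) hqk3
                omega
              · intro hke
                exact (hA3 k hk).mpr (by omega))
    · rw [splitA_loop, splitB_loop]
      rw [if_neg hlt, if_neg hlt]

-- ===== VERDICT (by name: the statement is the Claim_ definition above) =====
theorem split_on_newlines_spec : Claim_equal_split_on_newlines := by
  intro text m _ hpre
  unfold Spec_split_on_newlines split_on_newlines split_on_newlines_alt
  rcases hpre with hempty | hm
  · subst hempty
    rw [splitA_loop, splitB_loop]
    norm_num [PySem.Str.len]
  · have h0 : ((0 : Nat) : Int) = 0 := rfl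
    rw [← h0]
    refine pv_loop_eq text m hm (text.toList.length + 1) 0 0 [] (by omega) ?_
    intro k hk
    rcases (pv_nls_mem text).1 (nlIndices text)[k] (List.getElem_mem hk) with ⟨q, hq1, _, _⟩
    constructor
    · omega
    · intro h; omega
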